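-- pv_equiv track=rewrite | github.com/Abdulla-alk/Predicate-and-First-Order-Tableaux | tableau.py | is_closed
-- ===== SOURCE A (Python) =====
-- def is_closed(current):
--     literals = set()
--
--     for formula in current:
--         # If it's a gamma formula (tuple), skip it
--
--         # Handle literals and their negations
--         if formula.startswith("~"):
--             if formula[1:] in literals:  # Contradiction: ~P and P
--                 return True
--         else:
--             if "~" + formula in literals:  # Contradiction: P and ~P
--                 return True
--
--         # Add the formula to the set of seen literals
--         literals.add(formula)
--
--     return False
-- ===== SOURCE B (Python) =====
-- def is_closed(current):
--     # Build the full table of literals first, then scan once for a complement.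
--     literals = set()
--     for formula in current:
--         literals.add(formula)
--     for formula in current:
--         comp = formula[1:] if formula.startswith("~") else "~" + formula
--         if comp in literals:
--             return True
--     return False
-- ===== Notes on version B (the rewrite author's own statement) =====
-- stated objective: alternative
-- what changed: Replaces the fused check-then-add loop over previously seen literals with a two-phase build-the-full-set-then-scan decomposition, which also makes the result independent of formula order.
-- intended difference: On lists containing a double-negation pair like '~~P' together with '~P' where every occurrence of the outer negation precedes its complement (and no other complementary pair is ordered A's way), A returns False although the set contains the contradiction '~P'/'~~P', while B returns True; B's order-independent detection is the intended behaviour of a closure test. — e.g. on is_closed(["~~P", "~P"]): A returns false, B returns true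
import Mathlib
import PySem

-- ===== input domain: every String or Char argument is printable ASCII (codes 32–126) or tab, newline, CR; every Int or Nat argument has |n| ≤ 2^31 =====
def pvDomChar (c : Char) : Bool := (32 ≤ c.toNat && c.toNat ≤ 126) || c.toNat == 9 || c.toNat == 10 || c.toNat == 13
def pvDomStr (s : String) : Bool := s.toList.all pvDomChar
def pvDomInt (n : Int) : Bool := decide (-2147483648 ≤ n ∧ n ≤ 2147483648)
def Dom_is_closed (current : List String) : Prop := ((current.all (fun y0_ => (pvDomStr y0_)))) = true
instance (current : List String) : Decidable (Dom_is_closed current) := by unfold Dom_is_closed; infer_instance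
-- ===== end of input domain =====

-- B rebuilds the closure test as build-the-full-literal-set-then-scan (order-independent), instead of A's fused
-- check-against-previously-seen loop; equivalence is proved outside D_is_closed, where A misses a contradiction.

-- ===== PORT A =====
def is_closed_go (lits : PySem.Set String) : List String → Bool
  | [] => false
  | formula :: rest =>
    if PySem.Str.startswith formula "~" then
      if PySem.Set.contains lits (PySem.Str.slice formula (some 1) none) then true
      else is_closed_go (PySem.Set.add lits formula) rest
    else
      if PySem.Set.contains lits ("~" ++ formula) then true
      else is_closed_go (PySem.Set.add lits formula) rest

def is_closed (current : List String) : Bool :=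
  is_closed_go PySem.Set.empty current

-- ===== PORT B =====
def pvComp (formula : String) : String :=
  if PySem.Str.startswith formula "~" then PySem.Str.slice formula (some 1) none
  else "~" ++ formula

def is_closed_alt (current : List String) : Bool :=
  let literals := current.foldl PySem.Set.add PySem.Set.empty
  current.any (fun formula => PySem.Set.contains literals (pvComp formula))

-- ===== PRECONDITION & SPEC =====
-- spec-level complement (strip or prepend a leading '~'), used only by D_is_closed
def pvCompSpec (f : String) : String :=
  match f.toList with
  | '~' :: rest => String.ofList rest
  | _ => String.ofList ('~' :: f.toList)

-- On lists containing a double-negation pair like '~~P' together with '~P' where every occurrence of the outer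
-- negation precedes its complement (and no other complementary pair is ordered A's way), A returns False although
-- the set contains the contradiction '~P'/'~~P', while B returns True; B's order-independent detection is the
-- intended behaviour of a closure test.
def D_is_closed (current : List String) : Prop :=
  (∃ f ∈ current, pvCompSpec f ∈ current) ∧
  current.Pairwise (fun a b => a ≠ pvCompSpec b)
instance (current : List String) : Decidable (D_is_closed current) := by
  unfold D_is_closed; infer_instance

def Spec_is_closed (current : List String) (out : Bool) : Prop :=
  ¬ D_is_closed current → out = is_closed_alt current
instance (current : List String) (out : Bool) : Decidable (Spec_is_closed current out) := by
  unfold Spec_is_closed; infer_instance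

def pvDiffWitness_is_closed : List String := ["~~P", "~P"]
def pvDiffWitnessOut_is_closed : Bool × Bool := (false, true)

-- ===== CLAIM (what is proved, stated in full; the proofs are below) =====
def Claim_unchanged_is_closed : Prop :=
  ∀ (current : List String), Dom_is_closed current → Spec_is_closed current (is_closed current)
def Claim_changed_is_closed : Prop :=
  Dom_is_closed (pvDiffWitness_is_closed) ∧ D_is_closed (pvDiffWitness_is_closed) ∧
  is_closed (pvDiffWitness_is_closed) = pvDiffWitnessOut_is_closed.1 ∧
  is_closed_alt (pvDiffWitness_is_closed) = pvDiffWitnessOut_is_closed.2 ∧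
  pvDiffWitnessOut_is_closed.1 ≠ pvDiffWitnessOut_is_closed.2
def Claim_exact_is_closed : Prop :=
  ∀ (current : List String), Dom_is_closed current → D_is_closed current →
    is_closed current ≠ is_closed_alt current

-- ===== LEMMAS AND PROOFS =====

lemma pvContains_iff {s : PySem.Set String} {x : String} :
    PySem.Set.contains s x = true ↔ x ∈ s := by
  simp [PySem.Set.contains]

lemma pvComp_eq (f : String) : pvComp f = pvCompSpec f := by
  apply String.toList_inj.mp
  unfold pvComp pvCompSpec
  by_cases hs : PySem.Str.startswith f "~" = true
  · have hpre : ("~" : String).toList <+: f.toList := by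
      simpa using (PySem.Chars.startswith_iff f.toList "~".toList).mp (by simpa using hs)
    obtain ⟨r, hr⟩ := hpre
    have hr' : f.toList = '~' :: r := by simpa using hr.symm
    rw [if_pos hs, hr']
    simp [PySem.List.slice_from_one, hr']
  · rw [if_neg hs]
    have hns : ¬ ("~" : String).toList <+: f.toList := by
      intro h
      exact hs (by simpa using (PySem.Chars.startswith_iff f.toList "~".toList).mpr (by simpa using h))
    rcases h : f.toList with _ | ⟨c, rest⟩
    · simp [h]
    · have hc : c ≠ '~' := by
        intro hc; subst hc; exact hns (by simp [h])
      simp [h, hc]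

lemma pvMem_foldl_add (l : List String) (s : PySem.Set String) (x : String) :
    x ∈ l.foldl PySem.Set.add s ↔ x ∈ s ∨ x ∈ l := by
  induction l generalizing s with
  | nil => simp
  | cons f l ih =>
    simp only [List.foldl_cons, ih, PySem.Set.mem_add, List.mem_cons]
    tauto

lemma pvGo_cons (s : PySem.Set String) (f : String) (l : List String) :
    is_closed_go s (f :: l) = true ↔
      pvComp f ∈ s ∨ is_closed_go (PySem.Set.add s f) l = true := by
  unfold pvComp
  by_cases hs : PySem.Str.startswith f "~" = true
  · simp only [is_closed_go, hs]
    by_cases hm : PySem.Set.contains s (PySem.Str.slice f (some 1) none) = true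
    · simp [pvContains_iff.mp hm]
    · simp
  · simp only [is_closed_go, hs]
    by_cases hm : PySem.Set.contains s ("~" ++ f) = true
    · simp [pvContains_iff.mp hm]
    · simp

lemma pvGo_iff (l : List String) : ∀ s : PySem.Set String,
    is_closed_go s l = true ↔
      ¬ (l.Pairwise (fun a b => a ≠ pvComp b) ∧ ∀ f ∈ l, pvComp f ∉ s) := by
  induction l with
  | nil => intro s; simp [is_closed_go]
  | cons f l ih =>
    intro s
    rw [pvGo_cons, ih]
    by_cases hm : pvComp f ∈ s
    · simp only [hm, true_or, true_iff]
      rintro ⟨_, hall⟩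
      exact hall f (by simp) hm
    · simp only [hm, false_or]
      constructor
      · intro h hc
        obtain ⟨hpwc, hnot⟩ := hc
        obtain ⟨hhead, hpw⟩ := List.pairwise_cons.mp hpwc
        refine h ⟨hpw, fun g hg hmem => ?_⟩
        rcases (PySem.Set.mem_add s f (pvComp g)).mp hmem with h1 | h1
        · exact hnot g (List.mem_cons_of_mem f hg) h1
        · exact hhead g hg h1.symm
      · intro h hc
        obtain ⟨hpw, hall⟩ := hc
        refine h ⟨List.pairwise_cons.mpr ⟨fun b hb hfb => ?_, hpw⟩, fun g hg hmem => ?_⟩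
        · exact hall b hb ((PySem.Set.mem_add s f (pvComp b)).mpr (Or.inr hfb.symm))
        · rcases List.mem_cons.mp hg with rfl | hg'
          · exact hm hmem
          · exact hall g hg' ((PySem.Set.mem_add s f (pvComp g)).mpr (Or.inl hmem))

lemma pvA_iff (l : List String) :
    is_closed l = true ↔ ¬ l.Pairwise (fun a b => a ≠ pvComp b) := by
  unfold is_closed
  rw [pvGo_iff]
  simp [PySem.Set.empty]

lemma pvB_iff (l : List String) :
    is_closed_alt l = true ↔ ∃ f ∈ l, pvComp f ∈ l := by
  unfold is_closed_alt
  simp only [List.any_eq_true, pvContains_iff, pvMem_foldl_add]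
  simp [PySem.Set.empty]

lemma pvA_imp_B (l : List String) (h : is_closed l = true) : is_closed_alt l = true := by
  rw [pvB_iff]
  have := (pvA_iff l).mp h
  rw [List.pairwise_iff_getElem] at this
  simp only [not_forall, not_not] at this
  obtain ⟨i, j, hi, hj, hij, heq⟩ := this
  exact ⟨l[j], List.getElem_mem hj, heq ▸ List.getElem_mem hi⟩

-- ===== VERDICT (by name: the statement is the Claim_ definition above) =====
theorem is_closed_spec : Claim_unchanged_is_closed := by
  intro current _
  unfold Spec_is_closed
  intro hnd
  unfold D_is_closed at hnd
  rw [not_and_or] at hnd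
  apply Bool.eq_iff_iff.mpr
  constructor
  · exact pvA_imp_B current
  · intro hB
    rcases hnd with hnd | hnd
    · exact absurd ((pvB_iff current).mp hB) (by simpa [pvComp_eq] using hnd)
    · by_contra hA
      have hpw : ¬ current.Pairwise (fun a b => a ≠ pvComp b) := by
        simpa [pvComp_eq] using hnd
      exact hA ((pvA_iff current).mpr hpw)

theorem is_closed_changed : Claim_changed_is_closed := by
  unfold Claim_changed_is_closed; decide

theorem is_closed_tight : Claim_exact_is_closed := by
  intro current _ hd
  obtain ⟨hE, hP⟩ := hd
  have hA : is_closed current = false := by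
    rw [Bool.eq_false_iff]
    intro h
    exact (pvA_iff current).mp h (by simpa [pvComp_eq] using hP)
  have hB : is_closed_alt current = true := by
    rw [pvB_iff]
    simpa [pvComp_eq] using hE
  simp [hA, hB]
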